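-- pv_equiv track=rewrite | github.com/0xfauzi/rlm-rs | src/rlm_rs/parser/service.py | _build_page_spans
-- ===== SOURCE A (Python) =====
-- def _build_page_spans(pages: list[str]) -> list[dict[str, int]]:
--     if not pages:
--         pages = [""]
--     spans: list[dict[str, int]] = []
--     offset = 0
--     for page_num, page_text in enumerate(pages, start=1):
--         end = offset + len(page_text)
--         spans.append({"page_num": page_num, "start_char": offset, "end_char": end})
--         offset = end
--     return spans
-- ===== SOURCE B (Python) =====
-- def _build_page_spans(pages: list[str]) -> list[dict[str, int]]:
--     if not pages:
--         pages = [""]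
--     # phase 1: boundary table of prefix offsets
--     offsets = [0]
--     start = 0
--     for p in pages:
--         start += len(p)
--         offsets.append(start)
--     # phase 2: emit spans by zipping consecutive boundaries
--     return [{"page_num": i, "start_char": s, "end_char": e}
--             for i, (s, e) in enumerate(zip(offsets, offsets[1:]), start=1)]
-- ===== Notes on version B (the rewrite author's own statement) =====
-- stated objective: alternative
-- what changed: Replaces the single loop with a mutable running offset by a two-phase construction: a recursively built prefix-offset boundary table, then spans emitted by zipping consecutive boundaries.
import Mathlib
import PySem

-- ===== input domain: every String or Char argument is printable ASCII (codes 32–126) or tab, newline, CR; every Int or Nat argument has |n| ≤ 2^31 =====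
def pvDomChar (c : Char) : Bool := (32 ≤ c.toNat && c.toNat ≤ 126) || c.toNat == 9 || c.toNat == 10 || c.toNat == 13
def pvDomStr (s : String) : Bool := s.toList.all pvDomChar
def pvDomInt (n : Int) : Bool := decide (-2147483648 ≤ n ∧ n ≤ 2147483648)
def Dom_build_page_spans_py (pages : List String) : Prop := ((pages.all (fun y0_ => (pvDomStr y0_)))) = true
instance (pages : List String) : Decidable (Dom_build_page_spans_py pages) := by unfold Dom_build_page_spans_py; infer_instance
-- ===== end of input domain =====

-- ===== PORT A =====
def build_page_spans_py (pages : List String) : List (List (String × Int)) :=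
  let pgs := if pages.isEmpty then [""] else pages
  let r := (PySem.List.enumerate pgs 1).foldl
    (fun (st : List (List (String × Int)) × Int) pe =>
      let e := st.2 + PySem.Str.len pe.2
      (st.1 ++ [[("page_num", pe.1), ("start_char", st.2), ("end_char", e)]], e))
    ([], 0)
  r.1

-- ===== PORT B =====
-- B first builds the boundary table of prefix offsets, then zips consecutive boundaries
-- (offsets[1:] on this nonempty list is exactly .tail).
def pvOffsets (pages : List String) (start : Int) : List Int :=
  (pages.foldl (fun (st : List Int × Int) p =>
      let t := st.2 + PySem.Str.len p
      (st.1 ++ [t], t)) ([start], start)).1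

def build_page_spans_py_alt (pages : List String) : List (List (String × Int)) :=
  let pgs := if pages.isEmpty then [""] else pages
  let off := pvOffsets pgs 0
  (PySem.List.enumerate (off.zip off.tail) 1).map
    (fun p => [("page_num", p.1), ("start_char", p.2.1), ("end_char", p.2.2)])

-- ===== PRECONDITION & SPEC =====
def Spec_build_page_spans_py (pages : List String) (out : List (List (String × Int))) : Prop := out = build_page_spans_py_alt pages
instance (pages : List String) (out : List (List (String × Int))) : Decidable (Spec_build_page_spans_py pages out) := by unfold Spec_build_page_spans_py; infer_instance

-- ===== CLAIM (what is proved, stated in full; the proofs are below) =====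
def Claim_equal_build_page_spans_py : Prop := ∀ (pages : List String), Dom_build_page_spans_py pages → Spec_build_page_spans_py pages (build_page_spans_py pages)

-- ===== LEMMAS AND PROOFS =====

-- proof-only recursive characterisation of the boundary table
def pvOffsetsRec : List String → Int → List Int
  | [], s => [s]
  | p :: rest, s => s :: pvOffsetsRec rest (s + PySem.Str.len p)

lemma pvOffsetsRec_head_tail (l : List String) (s : Int) :
    pvOffsetsRec l s = s :: (pvOffsetsRec l s).tail := by
  cases l <;> simp [pvOffsetsRec]

lemma pvOffsets_fold (l : List String) (acc : List Int) (s : Int) :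
    (l.foldl (fun (st : List Int × Int) p =>
        let t := st.2 + PySem.Str.len p
        (st.1 ++ [t], t)) (acc, s)).1
    = acc ++ (pvOffsetsRec l s).tail := by
  induction l generalizing acc s with
  | nil => simp [pvOffsetsRec]
  | cons p rest ih =>
      simp only [List.foldl_cons, pvOffsetsRec]
      rw [ih]
      rw [pvOffsetsRec_head_tail rest (s + PySem.Str.len p)]
      simp

lemma pvOffsets_eq_rec (l : List String) (s : Int) :
    pvOffsets l s = pvOffsetsRec l s := by
  unfold pvOffsets
  rw [pvOffsets_fold]
  rw [pvOffsetsRec_head_tail l s]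
  simp

lemma pv_loop_eq (l : List String) (n off : Int) (acc : List (List (String × Int))) :
    ((PySem.List.enumerate l n).foldl
      (fun (st : List (List (String × Int)) × Int) pe =>
        let e := st.2 + PySem.Str.len pe.2
        (st.1 ++ [[("page_num", pe.1), ("start_char", st.2), ("end_char", e)]], e))
      (acc, off)).1
    = acc ++ (PySem.List.enumerate ((pvOffsetsRec l off).zip (pvOffsetsRec l off).tail) n).map
        (fun p => [("page_num", p.1), ("start_char", p.2.1), ("end_char", p.2.2)]) := by
  induction l generalizing n off acc with
  | nil => simp [pvOffsetsRec, PySem.List.enumerate_nil]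
  | cons p rest ih =>
      rw [PySem.List.enumerate_cons]
      simp only [List.foldl_cons]
      rw [ih]
      conv_rhs => rw [show pvOffsetsRec (p :: rest) off = off :: pvOffsetsRec rest (off + PySem.Str.len p) from rfl]
      rw [pvOffsetsRec_head_tail rest (off + PySem.Str.len p)]
      simp [PySem.List.enumerate_cons]

-- ===== VERDICT (by name: the statement is the Claim_ definition above) =====
theorem build_page_spans_py_spec : Claim_equal_build_page_spans_py := by
  intro pages _
  unfold Spec_build_page_spans_py build_page_spans_py build_page_spans_py_alt
  simp only []
  rw [pvOffsets_eq_rec, pv_loop_eq]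
  simp
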